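-- pv_equiv track=rewrite | github.com/DavidRaffeil/DeFiPilot | core/market_signals_adapter.py | _mode_from_levels
-- ===== SOURCE A (Python) =====
-- from typing import Optional, Tuple, Dict, Any, Mapping
--
-- _SEVERITY_ORDER: Mapping[str, int] = {"NORMAL": 0, "TENSION": 1, "ALERTE": 2, "CRISE": 3, "PANIC": 4}
--
-- def _is_number(value: Any) -> bool:
--     return isinstance(value, (int, float)) and not isinstance(value, bool)
--
-- def _mode_from_levels(levels: list[str], min_counts: Mapping[str, Any]) -> str:
--     counts_at_or_above: dict[str, int] = {"TENSION": 0, "ALERTE": 0, "CRISE": 0, "PANIC": 0}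
--
--     for lvl in levels:
--         s = _SEVERITY_ORDER.get(str(lvl).upper(), 0)
--         if s >= _SEVERITY_ORDER["TENSION"]:
--             counts_at_or_above["TENSION"] += 1
--         if s >= _SEVERITY_ORDER["ALERTE"]:
--             counts_at_or_above["ALERTE"] += 1
--         if s >= _SEVERITY_ORDER["CRISE"]:
--             counts_at_or_above["CRISE"] += 1
--         if s >= _SEVERITY_ORDER["PANIC"]:
--             counts_at_or_above["PANIC"] += 1
--
--     def _min_for(mode: str, default: int) -> int:
--         raw = min_counts.get(mode)
--         if _is_number(raw):
--             return int(raw)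
--         return default
--
--     for mode in ("PANIC", "CRISE", "ALERTE", "TENSION"):
--         required = _min_for(mode, 1)
--         if counts_at_or_above.get(mode, 0) >= max(1, required):
--             return mode
--
--     return "NORMAL"
-- ===== SOURCE B (Python) =====
-- from typing import Any, Mapping
--
-- _SEVERITY_ORDER: Mapping[str, int] = {"NORMAL": 0, "TENSION": 1, "ALERTE": 2, "CRISE": 3, "PANIC": 4}
--
-- def _is_number(value: Any) -> bool:
--     return isinstance(value, (int, float)) and not isinstance(value, bool)
--
-- def _mode_from_levels(levels, min_counts):
--     # Order statistics instead of counting: sort the severities descending once;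
--     # "at least k elements have severity >= thr" holds iff the k-th largest
--     # severity exists and is >= thr.
--     sev = sorted((_SEVERITY_ORDER.get(str(l).upper(), 0) for l in levels), reverse=True)
--     for mode, thr in (("PANIC", 4), ("CRISE", 3), ("ALERTE", 2), ("TENSION", 1)):
--         raw = min_counts.get(mode)
--         k = max(1, int(raw) if _is_number(raw) else 1)
--         if k <= len(sev) and sev[k - 1] >= thr:
--             return mode
--     return "NORMAL"
-- ===== Notes on version B (the rewrite author's own statement) =====
-- stated objective: alternative
-- what changed: Replaces A's fused per-element four-counter counting loop with an order-statistics algorithm: sort the mapped severities descending once, then a mode fires iff the k-th largest severity (k = max(1, configured minimum)) exists and meets the mode's threshold - no at-or-above counters are ever computed.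
import Mathlib
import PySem

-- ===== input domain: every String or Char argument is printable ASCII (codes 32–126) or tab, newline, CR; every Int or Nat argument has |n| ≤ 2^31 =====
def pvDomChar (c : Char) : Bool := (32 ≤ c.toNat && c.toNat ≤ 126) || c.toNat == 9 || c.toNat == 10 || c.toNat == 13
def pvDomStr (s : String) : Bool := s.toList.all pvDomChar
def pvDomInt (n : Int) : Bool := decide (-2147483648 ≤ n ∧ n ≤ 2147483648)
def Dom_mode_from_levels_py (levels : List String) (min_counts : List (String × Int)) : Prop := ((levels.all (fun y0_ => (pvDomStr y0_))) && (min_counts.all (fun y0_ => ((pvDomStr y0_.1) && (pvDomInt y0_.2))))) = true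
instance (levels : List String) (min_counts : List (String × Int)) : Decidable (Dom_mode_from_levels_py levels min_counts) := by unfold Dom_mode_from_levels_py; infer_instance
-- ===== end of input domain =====

-- B replaces A's fused four-counter counting loop by an order-statistics algorithm:
-- sort the severities descending once, then a mode fires iff the k-th largest
-- severity exists and meets the mode's threshold (objective: alternative).

-- ===== PORT A =====
def pvSevOrderA : PySem.Dict String Int :=
  PySem.Dict.mk [("NORMAL", 0), ("TENSION", 1), ("ALERTE", 2), ("CRISE", 3), ("PANIC", 4)]

-- _SEVERITY_ORDER.get(str(lvl).upper(), 0)  (str(lvl) is the identity on a str)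
def pvSevA (lvl : String) : Int := pvSevOrderA.getD (PySem.Str.upper lvl) 0

-- one iteration of A's counting loop (counts["K"] += 1, key always present)
def pvStepA (d : PySem.Dict String Int) (lvl : String) : PySem.Dict String Int :=
  let s := pvSevA lvl
  let d := if s ≥ pvSevOrderA.getD "TENSION" 0 then d.modify "TENSION" 0 (· + 1) else d
  let d := if s ≥ pvSevOrderA.getD "ALERTE" 0 then d.modify "ALERTE" 0 (· + 1) else d
  let d := if s ≥ pvSevOrderA.getD "CRISE" 0 then d.modify "CRISE" 0 (· + 1) else d
  let d := if s ≥ pvSevOrderA.getD "PANIC" 0 then d.modify "PANIC" 0 (· + 1) else d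
  d

def pvCountsA (levels : List String) : PySem.Dict String Int :=
  levels.foldl pvStepA
    (PySem.Dict.mk [("TENSION", 0), ("ALERTE", 0), ("CRISE", 0), ("PANIC", 0)])

-- _min_for: min_counts.get(mode) is an Int whenever present, so _is_number(raw) is
-- always True under the type convention and int(raw) = raw.
def pvMinForA (mc : List (String × Int)) (mode : String) (dflt : Int) : Int :=
  match (PySem.Dict.mk mc).get? mode with
  | some raw => raw
  | none => dflt

def mode_from_levels_py (levels : List String) (min_counts : List (String × Int)) : String :=
  let counts := pvCountsA levels
  -- A's loop over the literal 4-tuple of modes, unrolled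
  if counts.getD "PANIC" 0 ≥ max 1 (pvMinForA min_counts "PANIC" 1) then "PANIC"
  else if counts.getD "CRISE" 0 ≥ max 1 (pvMinForA min_counts "CRISE" 1) then "CRISE"
  else if counts.getD "ALERTE" 0 ≥ max 1 (pvMinForA min_counts "ALERTE" 1) then "ALERTE"
  else if counts.getD "TENSION" 0 ≥ max 1 (pvMinForA min_counts "TENSION" 1) then "TENSION"
  else "NORMAL"

-- ===== PORT B =====
-- sorted((_SEVERITY_ORDER.get(str(l).upper(), 0) for l in levels), reverse=True)
-- (_SEVERITY_ORDER is the shared module constant; pvSevA is its lookup)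
def pvSevSortedB (levels : List String) : List Int :=
  PySem.List.sorted (levels.map pvSevA) (fun x => x) true

-- B's loop over the (mode, threshold) pairs: k-th largest severity vs threshold
def pvPickB (sev : List Int) (mc : List (String × Int)) : List (String × Int) → String
  | [] => "NORMAL"
  | (mode, thr) :: rest =>
      let k := max 1 (match (PySem.Dict.mk mc).get? mode with
                      | some raw => raw
                      | none => 1)
      if (decide (k ≤ (sev.length : Int)) &&
          (match PySem.List.pyGet? sev (k - 1) with
           | some v => decide (v ≥ thr)
           | none => false)) then mode
      else pvPickB sev mc rest

def mode_from_levels_py_alt (levels : List String) (min_counts : List (String × Int)) : String :=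
  pvPickB (pvSevSortedB levels) min_counts [("PANIC", 4), ("CRISE", 3), ("ALERTE", 2), ("TENSION", 1)]

-- ===== PRECONDITION & SPEC =====
def Spec_mode_from_levels_py (levels : List String) (min_counts : List (String × Int)) (out : String) : Prop := out = mode_from_levels_py_alt levels min_counts
instance (levels : List String) (min_counts : List (String × Int)) (out : String) : Decidable (Spec_mode_from_levels_py levels min_counts out) := by unfold Spec_mode_from_levels_py; infer_instance

-- ===== CLAIM (what is proved, stated in full; the proofs are below) =====
def Claim_equal_mode_from_levels_py : Prop := ∀ (levels : List String) (min_counts : List (String × Int)), Dom_mode_from_levels_py levels min_counts → Spec_mode_from_levels_py levels min_counts (mode_from_levels_py levels min_counts)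

-- ===== LEMMAS AND PROOFS =====

lemma sev_cases (l : String) :
    pvSevA l = 0 ∨ pvSevA l = 1 ∨ pvSevA l = 2 ∨ pvSevA l = 3 ∨ pvSevA l = 4 := by
  unfold pvSevA
  set u := PySem.Str.upper l with hu
  by_cases h0 : u = "NORMAL"
  · rw [h0]; decide
  by_cases h1 : u = "TENSION"
  · rw [h1]; decide
  by_cases h2 : u = "ALERTE"
  · rw [h2]; decide
  by_cases h3 : u = "CRISE"
  · rw [h3]; decide
  by_cases h4 : u = "PANIC"
  · rw [h4]; decide
  have g0 : ("NORMAL" == u) = false := by simp [Ne.symm h0]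
  have g1 : ("TENSION" == u) = false := by simp [Ne.symm h1]
  have g2 : ("ALERTE" == u) = false := by simp [Ne.symm h2]
  have g3 : ("CRISE" == u) = false := by simp [Ne.symm h3]
  have g4 : ("PANIC" == u) = false := by simp [Ne.symm h4]
  simp [pvSevOrderA, PySem.Dict.getD, PySem.Dict.get?, List.find?, g0, g1, g2, g3, g4]

-- one step of A's loop, at each of its four keys
lemma stepA_getD (d : PySem.Dict String Int) (x : String) :
    ((pvStepA d x).getD "TENSION" 0 = d.getD "TENSION" 0 + (if 1 ≤ pvSevA x then 1 else 0))
  ∧ ((pvStepA d x).getD "ALERTE" 0 = d.getD "ALERTE" 0 + (if 2 ≤ pvSevA x then 1 else 0))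
  ∧ ((pvStepA d x).getD "CRISE" 0 = d.getD "CRISE" 0 + (if 3 ≤ pvSevA x then 1 else 0))
  ∧ ((pvStepA d x).getD "PANIC" 0 = d.getD "PANIC" 0 + (if 4 ≤ pvSevA x then 1 else 0)) := by
  have e1 : pvSevOrderA.getD "TENSION" 0 = 1 := by decide
  have e2 : pvSevOrderA.getD "ALERTE" 0 = 2 := by decide
  have e3 : pvSevOrderA.getD "CRISE" 0 = 3 := by decide
  have e4 : pvSevOrderA.getD "PANIC" 0 = 4 := by decide
  unfold pvStepA
  rcases sev_cases x with h | h | h | h | h <;>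
  · refine ⟨?_, ?_, ?_, ?_⟩ <;>
    simp [h, e1, e2, e3, e4, PySem.Dict.getD_modify]

-- A's fold characterised at each of its four keys
lemma countsA_spec (ls : List String) (d : PySem.Dict String Int) :
    (ls.foldl pvStepA d).getD "TENSION" 0
        = d.getD "TENSION" 0 + (ls.countP (fun l => decide (1 ≤ pvSevA l)) : Int)
  ∧ (ls.foldl pvStepA d).getD "ALERTE" 0
        = d.getD "ALERTE" 0 + (ls.countP (fun l => decide (2 ≤ pvSevA l)) : Int)
  ∧ (ls.foldl pvStepA d).getD "CRISE" 0
        = d.getD "CRISE" 0 + (ls.countP (fun l => decide (3 ≤ pvSevA l)) : Int)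
  ∧ (ls.foldl pvStepA d).getD "PANIC" 0
        = d.getD "PANIC" 0 + (ls.countP (fun l => decide (4 ≤ pvSevA l)) : Int) := by
  induction ls generalizing d with
  | nil => simp
  | cons x xs ih =>
      obtain ⟨iT, iA, iC, iP⟩ := ih (pvStepA d x)
      obtain ⟨sT, sA, sC, sP⟩ := stepA_getD d x
      rcases sev_cases x with h | h | h | h | h <;>
      refine ⟨?_, ?_, ?_, ?_⟩ <;>
      simp [List.foldl_cons, iT, iA, iC, iP, sT, sA, sC, sP, h] <;>
      omega

-- order statistics: in a descending-sorted Int list, the j-th element (0-based)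
-- is ≥ t iff more than j elements are ≥ t
lemma orderstat (t : Int) (sev : List Int) (h : sev.Pairwise (fun a b => b ≤ a)) (j : Nat) :
    (match sev[j]? with | some v => decide (v ≥ t) | none => false)
      = decide (j < sev.countP (fun v => decide (t ≤ v))) := by
  induction sev generalizing j with
  | nil => simp
  | cons x xs ih =>
      obtain ⟨hx, hxs⟩ := List.pairwise_cons.mp h
      cases j with
      | zero =>
          by_cases htx : t ≤ x
          · simp [htx, ge_iff_le]
          · have h0 : xs.countP (fun v => decide (t ≤ v)) = 0 := by
              rw [List.countP_eq_zero]
              intro v hv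
              simp only [decide_eq_true_eq]
              exact fun htv => htx (le_trans htv (hx v hv))
            simp [htx, h0, ge_iff_le]
      | succ j =>
          have hj := ih hxs j
          by_cases htx : t ≤ x
          · simpa [List.countP_cons, htx, Nat.succ_lt_succ_iff] using hj
          · have h0 : xs.countP (fun v => decide (t ≤ v)) = 0 := by
              rw [List.countP_eq_zero]
              intro v hv
              simp only [decide_eq_true_eq]
              exact fun htv => htx (le_trans htv (hx v hv))
            rw [h0] at hj
            simpa [List.countP_cons, htx, h0] using hj

-- B's test for one mode ↔ "count of severities ≥ t is at least max 1 r"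
lemma condB_eq (levels : List String) (t : Int) (r : Int) :
    (decide (max 1 r ≤ ((pvSevSortedB levels).length : Int)) &&
      (match PySem.List.pyGet? (pvSevSortedB levels) (max 1 r - 1) with
       | some v => decide (v ≥ t)
       | none => false))
      = decide ((levels.countP (fun l => decide (t ≤ pvSevA l)) : Int) ≥ max 1 r) := by
  set sev := pvSevSortedB levels with hsev
  have hperm : sev.Perm (levels.map pvSevA) := PySem.List.sorted_perm _ _ _
  have hpw : sev.Pairwise (fun a b => b ≤ a) := by
    have := PySem.List.sorted_pairwise_rev (levels.map pvSevA) (fun x => x)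
    simpa using this
  have hlen : sev.length = levels.length := by
    rw [hperm.length_eq, List.length_map]
  have hcnt : sev.countP (fun v => decide (t ≤ v)) = levels.countP (fun l => decide (t ≤ pvSevA l)) := by
    rw [hperm.countP_eq, List.countP_map]
    rfl
  set k := max 1 r with hk
  have hk1 : 1 ≤ k := le_max_left _ _
  have hidx : (k - 1) = (((k - 1).toNat : Nat) : Int) := by omega
  rw [hidx, PySem.List.pyGet?_natCast, orderstat t sev hpw]
  have hcle : sev.countP (fun v => decide (t ≤ v)) ≤ sev.length := List.countP_le_length
  by_cases hkk : k ≤ (sev.length : Int)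
  · simp only [hkk, decide_true, Bool.true_and]
    rw [hcnt.symm]
    congr 1
    simp only [eq_iff_iff, ge_iff_le]
    omega
  · simp only [hkk, decide_false, Bool.false_and]
    symm
    simp only [decide_eq_false_iff_not, ge_iff_le, not_le]
    have h1 : ((levels.countP (fun l => decide (t ≤ pvSevA l)) : Nat) : Int) ≤ (sev.length : Int) := by
      rw [← hcnt]; exact_mod_cast hcle
    omega

-- ===== VERDICT (by name: the statement is the Claim_ definition above) =====
theorem mode_from_levels_py_spec : Claim_equal_mode_from_levels_py := by
  intro levels min_counts _
  unfold Spec_mode_from_levels_py mode_from_levels_py mode_from_levels_py_alt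
  obtain ⟨cT, cA, cC, cP⟩ := countsA_spec levels
    (PySem.Dict.mk [("TENSION", 0), ("ALERTE", 0), ("CRISE", 0), ("PANIC", 0)])
  simp only [pvCountsA, cT, cA, cC, cP, pvPickB, pvMinForA, condB_eq]
  norm_num [PySem.Dict.getD, PySem.Dict.get?_mk_cons]
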